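-- pv_equiv track=rewrite | github.com/kipeum86/legal-writing-agent | tests/revision/test_level_b.py | _summary_from_changes
-- ===== SOURCE A (Python) =====
-- def _summary_from_changes(changes: list[dict[str, str]]) -> dict[str, int]:
--     summary = {"added": 0, "deleted": 0, "modified": 0}
--     for change in changes:
--         if change["type"] == "insert":
--             summary["added"] += 1
--         elif change["type"] == "delete":
--             summary["deleted"] += 1
--         else:
--             summary["modified"] += 1
--     return summary
-- ===== SOURCE B (Python) =====
-- def _summary_from_changes(changes: list[dict[str, str]]) -> dict[str, int]:
--     types = [change["type"] for change in changes]
--     added = types.count("insert")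
--     deleted = types.count("delete")
--     return {"added": added, "deleted": deleted,
--             "modified": len(changes) - added - deleted}
-- ===== Notes on version B (the rewrite author's own statement) =====
-- stated objective: simpler
-- what changed: Replaces the per-element if/elif/else branching with incremental dict updates by extracting the type list once, counting 'insert' and 'delete' with list.count, and deriving 'modified' as the arithmetic residual len(changes) - added - deleted.
import Mathlib
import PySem

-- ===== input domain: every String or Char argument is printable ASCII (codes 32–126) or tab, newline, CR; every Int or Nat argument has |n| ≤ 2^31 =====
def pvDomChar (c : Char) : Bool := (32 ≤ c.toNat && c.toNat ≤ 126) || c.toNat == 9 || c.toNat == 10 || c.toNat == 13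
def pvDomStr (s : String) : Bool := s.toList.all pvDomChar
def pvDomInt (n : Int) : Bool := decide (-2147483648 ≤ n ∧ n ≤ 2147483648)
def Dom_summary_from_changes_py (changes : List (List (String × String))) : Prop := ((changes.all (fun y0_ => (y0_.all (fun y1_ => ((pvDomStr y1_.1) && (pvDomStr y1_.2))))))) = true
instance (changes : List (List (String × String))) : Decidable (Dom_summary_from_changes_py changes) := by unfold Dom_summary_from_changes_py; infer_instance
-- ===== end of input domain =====

-- B extracts the type list once, counts "insert"/"delete" with list.count, and derives
-- "modified" as the residual len - added - deleted (objective: simpler).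


-- ===== PORT A =====
-- change["type"] is the first-match lookup; under Pre_ the key is present, so getD "" is never the raising case
def summary_from_changes_py (changes : List (List (String × String))) : List (String × Int) :=
  (changes.foldl (fun summary change =>
      if (change.lookup "type").getD "" = "insert" then summary.modify "added" 0 (· + 1)
      else if (change.lookup "type").getD "" = "delete" then summary.modify "deleted" 0 (· + 1)
      else summary.modify "modified" 0 (· + 1))
    (PySem.Dict.ofList [("added", (0 : Int)), ("deleted", 0), ("modified", 0)])).items

-- ===== PORT B =====
def summary_from_changes_py_alt (changes : List (List (String × String))) : List (String × Int) :=
  let types := changes.map (fun change => (change.lookup "type").getD "")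
  let added : Int := PySem.List.count types "insert"
  let deleted : Int := PySem.List.count types "delete"
  [("added", added), ("deleted", deleted), ("modified", (changes.length : Int) - added - deleted)]

-- ===== PRECONDITION & SPEC =====
-- Pre_ excludes exactly the inputs where some change lacks the key "type": there A raises KeyError (B too).
def Pre_summary_from_changes_py (changes : List (List (String × String))) : Prop :=
  ∀ change ∈ changes, (change.lookup "type").isSome = true
instance (changes : List (List (String × String))) : Decidable (Pre_summary_from_changes_py changes) := by unfold Pre_summary_from_changes_py; infer_instance
def pvWitness_summary_from_changes_py : (List (List (String × String))) := [[("type", "insert")], [("type", "replace")]]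

def Spec_summary_from_changes_py (changes : List (List (String × String))) (out : List (String × Int)) : Prop := out = summary_from_changes_py_alt changes
instance (changes : List (List (String × String))) (out : List (String × Int)) : Decidable (Spec_summary_from_changes_py changes out) := by unfold Spec_summary_from_changes_py; infer_instance

-- ===== CLAIM (what is proved, stated in full; the proofs are below) =====
def Claim_equal_summary_from_changes_py : Prop := ∀ (changes : List (List (String × String))), Dom_summary_from_changes_py changes → Pre_summary_from_changes_py changes → Spec_summary_from_changes_py changes (summary_from_changes_py changes)

-- ===== LEMMAS AND PROOFS =====

-- A's loop on the three-key literal dict, in closed form.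
theorem summary_loop (changes : List (List (String × String))) (a d m : Int) :
    changes.foldl (fun summary change =>
      if (change.lookup "type").getD "" = "insert" then summary.modify "added" 0 (· + 1)
      else if (change.lookup "type").getD "" = "delete" then summary.modify "deleted" 0 (· + 1)
      else summary.modify "modified" 0 (· + 1))
      (PySem.Dict.mk [("added", a), ("deleted", d), ("modified", m)])
    = PySem.Dict.mk
        [("added", a + ((changes.map (fun c => (c.lookup "type").getD "")).count "insert" : Int)),
         ("deleted", d + ((changes.map (fun c => (c.lookup "type").getD "")).count "delete" : Int)),
         ("modified", m + ((changes.length : Int)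
            - ((changes.map (fun c => (c.lookup "type").getD "")).count "insert" : Int)
            - ((changes.map (fun c => (c.lookup "type").getD "")).count "delete" : Int)))] := by
  induction changes generalizing a d m with
  | nil => simp
  | cons c cs ih =>
    simp only [List.foldl_cons, List.map_cons, List.length_cons]
    by_cases h1 : (c.lookup "type").getD "" = "insert"
    · rw [if_pos h1]
      have : (PySem.Dict.mk [("added", a), ("deleted", d), ("modified", m)]).modify "added" 0 (· + 1)
           = PySem.Dict.mk [("added", a + 1), ("deleted", d), ("modified", m)] := by
        simp [PySem.Dict.modify, PySem.Dict.contains, PySem.Dict.insert, PySem.Dict.getD, PySem.Dict.get?]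
      rw [this, ih]
      simp [h1]
      ring
    · rw [if_neg h1]
      by_cases h2 : (c.lookup "type").getD "" = "delete"
      · rw [if_pos h2]
        have : (PySem.Dict.mk [("added", a), ("deleted", d), ("modified", m)]).modify "deleted" 0 (· + 1)
             = PySem.Dict.mk [("added", a), ("deleted", d + 1), ("modified", m)] := by
          simp [PySem.Dict.modify, PySem.Dict.contains, PySem.Dict.insert, PySem.Dict.getD, PySem.Dict.get?]
        rw [this, ih]
        simp [h2]
        constructor <;> ring
      · rw [if_neg h2]
        have : (PySem.Dict.mk [("added", a), ("deleted", d), ("modified", m)]).modify "modified" 0 (· + 1)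
             = PySem.Dict.mk [("added", a), ("deleted", d), ("modified", m + 1)] := by
          simp [PySem.Dict.modify, PySem.Dict.contains, PySem.Dict.insert, PySem.Dict.getD, PySem.Dict.get?]
        rw [this, ih]
        simp [h1, h2]
        ring

-- ===== VERDICT (by name: the statement is the Claim_ definition above) =====
theorem summary_from_changes_py_spec : Claim_equal_summary_from_changes_py := by
  intro changes _ _
  unfold Spec_summary_from_changes_py summary_from_changes_py summary_from_changes_py_alt
  have h0 : PySem.Dict.ofList [("added", (0 : Int)), ("deleted", 0), ("modified", 0)]
      = PySem.Dict.mk [("added", (0 : Int)), ("deleted", 0), ("modified", 0)] := by decide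
  rw [h0, summary_loop]
  simp [PySem.List.count]
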